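-- pv_equiv track=rewrite | github.com/gregpuzzles1/Upwork | Tester/db.project.py | always_popular_names
-- ===== SOURCE A (Python) =====
-- def always_popular_names(rdb, gender, years=None, top=10):
--     """
--     Returns a list of names that are always in the top N in each year.
--     If years is None, checks all years in the database.
--     Sorted alphabetically.
--     """
--     if years is None:
--         years = set()
--         for data in rdb.values():
--             years.update(data.keys())
--         years = sorted(years)
--
--     result = []
--
--     for (name, g), year_data in rdb.items():
--         if g != gender:
--             continue
--
--         always_top = True
--         for y in years:
--             if y not in year_data or year_data[y][1] is None or year_data[y][1] > top:
--                 always_top = False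
--                 break
--
--         if always_top:
--             result.append(name)
--
--     return sorted(result)
-- ===== SOURCE B (Python) =====
-- def always_popular_names(rdb, gender, years=None, top=10):
--     """Inverted loop nesting: one pass builds a year -> qualifying-names index,
--     then a running intersection over the years is taken."""
--     if years is None:
--         years = sorted({y for data in rdb.values() for y in data})
--     peryear = {}
--     for (name, g), data in rdb.items():
--         if g != gender:
--             continue
--         for y, (_, rank) in data.items():
--             if rank is not None and rank <= top:
--                 peryear.setdefault(y, []).append(name)
--     survivors = None
--     for y in years:
--         ok = set(peryear.get(y, []))
--         survivors = ok if survivors is None else survivors & ok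
--     if survivors is None:
--         survivors = {name for (name, g) in rdb if g == gender}
--     return sorted(survivors)
-- ===== Notes on version B (the rewrite author's own statement) =====
-- stated objective: alternative
-- what changed: Loop nesting is inverted: instead of testing each name against every year with an inner break, B builds for each year the set of names ranked within top that year and maintains a running intersection across years (falling back to all names of the gender when the year list is empty).
import Mathlib
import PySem

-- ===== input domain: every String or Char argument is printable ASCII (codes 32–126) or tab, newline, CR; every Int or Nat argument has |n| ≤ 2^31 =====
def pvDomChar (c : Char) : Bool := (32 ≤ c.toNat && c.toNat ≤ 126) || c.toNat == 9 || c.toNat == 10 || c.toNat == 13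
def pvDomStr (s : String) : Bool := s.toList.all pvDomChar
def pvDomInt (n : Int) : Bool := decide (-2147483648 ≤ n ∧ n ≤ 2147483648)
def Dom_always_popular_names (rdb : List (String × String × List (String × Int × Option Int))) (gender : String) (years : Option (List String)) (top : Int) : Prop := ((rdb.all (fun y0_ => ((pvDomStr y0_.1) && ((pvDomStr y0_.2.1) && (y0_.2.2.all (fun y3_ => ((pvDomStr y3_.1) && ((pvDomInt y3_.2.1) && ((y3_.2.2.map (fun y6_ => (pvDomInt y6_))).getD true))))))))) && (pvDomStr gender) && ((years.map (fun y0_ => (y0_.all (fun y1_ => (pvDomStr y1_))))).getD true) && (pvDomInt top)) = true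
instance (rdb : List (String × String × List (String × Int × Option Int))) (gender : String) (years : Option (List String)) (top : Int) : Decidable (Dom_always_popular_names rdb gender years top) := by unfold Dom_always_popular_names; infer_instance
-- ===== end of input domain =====

-- ===== PORT A =====
-- B differs from A by inverting the loop nesting: one pass builds a year -> qualifying-names index, then a running intersection over the years is taken.

-- lookup year_data[y] with Python-dict (first-key) semantics; Pre_ keeps keys unique
def pvLookup (yd : List (String × Int × Option Int)) (y : String) : Option (Int × Option Int) :=
  (PySem.Dict.mk yd).get? y

-- A's inner 'for y in years' loop with its break
def pvAlwaysTop (yd : List (String × Int × Option Int)) (top : Int) : List String → Bool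
  | [] => true
  | y :: ys =>
    match pvLookup yd y with
    | none => false
    | some (_, none) => false
    | some (_, some r) => if top < r then false else pvAlwaysTop yd top ys

-- A's 'years is None' prelude: collect all year keys into a set, then sort
def pvYearsAll (rdb : List (String × String × List (String × Int × Option Int))) : List String :=
  PySem.List.sorted
    (rdb.foldl (fun s e => PySem.Set.update s (e.2.2.map (·.1))) PySem.Set.empty)
    (fun x => x) false

def always_popular_names (rdb : List (String × String × List (String × Int × Option Int))) (gender : String) (years : Option (List String)) (top : Int) : List String :=
  let ys := match years with
    | none => pvYearsAll rdb
    | some l => l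
  let result := rdb.foldl (fun acc e =>
      if e.2.1 != gender then acc
      else if pvAlwaysTop e.2.2 top ys then acc ++ [e.1] else acc) ([] : List String)
  PySem.List.sorted result (fun x => x) false

-- ===== PORT B =====
-- rank is not None and rank <= top
def pvRankOk (p : String × Int × Option Int) (top : Int) : Bool :=
  match p.2.2 with
  | some r => decide (r ≤ top)
  | none => false

-- Source B's index-building pass: peryear.setdefault(y, []).append(name)
def pvPerYear (rdb : List (String × String × List (String × Int × Option Int))) (gender : String) (top : Int) : PySem.Dict String (List String) :=
  rdb.foldl (fun d e =>
      if e.2.1 != gender then d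
      else e.2.2.foldl (fun d p =>
          if pvRankOk p top then d.modify p.1 [] (fun l => l ++ [e.1]) else d) d)
    PySem.Dict.empty

def always_popular_names_alt (rdb : List (String × String × List (String × Int × Option Int))) (gender : String) (years : Option (List String)) (top : Int) : List String :=
  let ys := match years with
    | none => PySem.List.sorted (PySem.Set.ofList (rdb.flatMap (fun (e : String × String × List (String × Int × Option Int)) => e.2.2.map Prod.fst))) (fun x => x) false
    | some l => l
  let peryear := pvPerYear rdb gender top
  let survivors := ys.foldl (fun (s : Option (PySem.Set String)) y =>
      match s with
      | none => some (PySem.Set.ofList (peryear.getD y []))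
      | some t => some (PySem.Set.inter t (PySem.Set.ofList (peryear.getD y [])))) none
  let final := match survivors with
    | none => PySem.Set.ofList ((rdb.filter (fun (e : String × String × List (String × Int × Option Int)) => e.2.1 == gender)).map (fun e => e.1))
    | some s => s
  PySem.List.sorted final (fun x => x) false

-- ===== PRECONDITION & SPEC =====
-- Pre_ excludes association lists with duplicate keys (in rdb or in a year_data): such lists do not
-- represent a Python dict, so A (whose rdb and year_data are dicts) is never given them.
def Pre_always_popular_names (rdb : List (String × String × List (String × Int × Option Int))) (gender : String) (years : Option (List String)) (top : Int) : Prop :=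
  (rdb.map (fun e => (e.1, e.2.1))).Nodup ∧ ∀ e ∈ rdb, (e.2.2.map (·.1)).Nodup
instance (rdb : List (String × String × List (String × Int × Option Int))) (gender : String) (years : Option (List String)) (top : Int) : Decidable (Pre_always_popular_names rdb gender years top) := by unfold Pre_always_popular_names; infer_instance

def pvWitness_always_popular_names : (List (String × String × List (String × Int × Option Int))) × String × Option (List String) × Int :=
  ([("emma", ("F", [("2000", (10, some 1)), ("2001", (5, some 2))])), ("noah", ("M", [("2000", (9, some 1))]))], "F", none, 10)

def Spec_always_popular_names (rdb : List (String × String × List (String × Int × Option Int))) (gender : String) (years : Option (List String)) (top : Int) (out : List String) : Prop := out = always_popular_names_alt rdb gender years top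
instance (rdb : List (String × String × List (String × Int × Option Int))) (gender : String) (years : Option (List String)) (top : Int) (out : List String) : Decidable (Spec_always_popular_names rdb gender years top out) := by unfold Spec_always_popular_names; infer_instance

-- ===== CLAIM (what is proved, stated in full; the proofs are below) =====
def Claim_equal_always_popular_names : Prop := ∀ (rdb : List (String × String × List (String × Int × Option Int))) (gender : String) (years : Option (List String)) (top : Int), Dom_always_popular_names rdb gender years top → Pre_always_popular_names rdb gender years top → Spec_always_popular_names rdb gender years top (always_popular_names rdb gender years top)

-- ===== LEMMAS AND PROOFS =====

-- proof-side predicate: 'y in year_data and year_data[y][1] is not None and year_data[y][1] <= top'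
def pvPass (yd : List (String × Int × Option Int)) (y : String) (top : Int) : Bool :=
  match (PySem.Dict.mk yd).get? y with
  | some (_, some r) => decide (r ≤ top)
  | _ => false

-- proof-side shorthand: the year-y column of B's index (shown below to be its value)
def pvOkL (rdb : List (String × String × List (String × Int × Option Int))) (gender : String) (top : Int) (y : String) : List String :=
  (rdb.filter (fun e => e.2.1 == gender && pvPass e.2.2 y top)).map (fun e => e.1)

-- A's inner break-loop is the 'all years pass' predicate
theorem pvAlwaysTop_eq_all (yd : List (String × Int × Option Int)) (top : Int) (ys : List String) :
    pvAlwaysTop yd top ys = ys.all (fun y => pvPass yd y top) := by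
  induction ys with
  | nil => rfl
  | cons y ys ih =>
    rw [List.all_cons, ← ih]
    simp only [pvAlwaysTop, pvPass, pvLookup]
    rcases h : (PySem.Dict.mk yd).get? y with _ | ⟨c, _ | r⟩ <;> simp [h]
    by_cases htop : top < r
    · simp [htop, show ¬ (r ≤ top) by omega]
    · simp [htop, show r ≤ top by omega]

-- one entry's inner fold, rewritten as a fold over its (year, name) contribution pairs
theorem pv_inner_fold_pairs (yd : List (String × Int × Option Int)) (nm : String) (top : Int)
    (d : PySem.Dict String (List String)) :
    yd.foldl (fun d p => if pvRankOk p top then d.modify p.1 [] (fun l => l ++ [nm]) else d) d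
      = ((yd.filter (fun p => pvRankOk p top)).map (fun p => (p.1, nm))).foldl
          (fun d q => d.modify q.1 [] (fun l => l ++ [q.2])) d := by
  induction yd generalizing d with
  | nil => rfl
  | cons p yd ih =>
    rcases h : pvRankOk p top with _ | _ <;> simp [h, ih]

-- with unique year keys, the filtered column of one entry is its pass test
theorem pv_entry_column (yd : List (String × Int × Option Int)) (nm : String) (top : Int) (y : String)
    (hnd : (yd.map (·.1)).Nodup) :
    ((yd.filter (fun p => pvRankOk p top)).filter (fun p => p.1 == y)).map (fun _ => nm)
      = (if pvPass yd y top then [nm] else []) := by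
  induction yd with
  | nil => rfl
  | cons q yd ih =>
    obtain ⟨k, v⟩ := q
    simp only [List.map_cons, List.nodup_cons] at hnd
    have ih' := ih hnd.2
    have hpass : pvPass ((k, v) :: yd) y top
        = (if (k, v).1 == y then pvRankOk (k, v) top else pvPass yd y top) := by
      simp only [pvPass, pvRankOk, PySem.Dict.get?_mk_cons]
      rcases hqy : k == y with _ | _
      · simp [pvPass, hqy]
      · obtain ⟨cnt, rk⟩ := v
        rcases rk with _ | r <;> simp [hqy, pvRankOk]
    rw [hpass]
    rcases hqy : k == y with _ | _
    · -- head key is not y: head never reaches column y; induction closes it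
      rcases hro : pvRankOk (k, v) top with _ | _
      · simp only [List.filter_cons, hro, hqy, if_false, Bool.false_eq_true]
        exact ih'
      · simp only [List.filter_cons, hro, hqy, if_true, Bool.false_eq_true, if_false]
        exact ih'
    · -- head key is y: the tail holds no key y at all
      have hq1 : k = y := by simpa using hqy
      have hfil : (yd.filter (fun p => pvRankOk p top)).filter (fun p => p.1 == y) = [] := by
        refine List.filter_eq_nil_iff.mpr ?_
        intro p hp hc
        have hpk : p.1 = y := by simpa using hc
        refine hnd.1 ?_
        rw [hq1, ← hpk]
        exact List.mem_map_of_mem (List.mem_of_mem_filter hp)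
      rcases hro : pvRankOk (k, v) top with _ | _
      · simp [List.filter_cons, hro, hqy, hfil]
      · simp [List.filter_cons, hro, hqy, hfil]

-- the index built by B's one pass holds, at each year, exactly the qualifying names in rdb order
theorem pvPerYear_getD (rdb : List (String × String × List (String × Int × Option Int))) (gender : String)
    (top : Int)
    (hin : ∀ e ∈ rdb, (e.2.2.map (·.1)).Nodup) :
    ∀ y, (pvPerYear rdb gender top).getD y [] = pvOkL rdb gender top y := by
  have main : ∀ (l : List (String × String × List (String × Int × Option Int)))
      (d : PySem.Dict String (List String)), (∀ e ∈ l, (e.2.2.map (·.1)).Nodup) → ∀ y,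
      (l.foldl (fun d e =>
          if e.2.1 != gender then d
          else e.2.2.foldl (fun d p =>
              if pvRankOk p top then d.modify p.1 [] (fun l => l ++ [e.1]) else d) d) d).getD y []
        = d.getD y [] ++ pvOkL l gender top y := by
    intro l
    induction l with
    | nil => intro d _ y; simp [pvOkL]
    | cons e l ih =>
      intro d hnd y
      rw [List.foldl_cons]
      have hOk : pvOkL (e :: l) gender top y
          = (if e.2.1 == gender && pvPass e.2.2 y top then [e.1] else []) ++ pvOkL l gender top y := by
        simp only [pvOkL, List.filter_cons]
        rcases h : e.2.1 == gender && pvPass e.2.2 y top with _ | _ <;> simp [h]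
      rcases hg : e.2.1 == gender with _ | _
      · rw [show (e.2.1 != gender) = true by simp [bne, hg]]
        rw [if_pos rfl, ih d (fun e' he' => hnd e' (List.mem_cons_of_mem e he')), hOk, hg]
        simp
      · rw [show (e.2.1 != gender) = false by simp [bne, hg]]
        rw [if_neg (by simp)]
        rw [ih _ (fun e' he' => hnd e' (List.mem_cons_of_mem e he')) y, hOk, hg]
        rw [pv_inner_fold_pairs, PySem.Dict.getD_foldl_modify_append]
        rw [List.filter_map, List.append_assoc]
        refine congrArg _ (congrArg (· ++ pvOkL l gender top y) ?_)
        have := pv_entry_column e.2.2 e.1 top y (hnd e (List.mem_cons_self))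
        rw [show (((fun (p : String × String) => p.1 == y) ∘ fun p => (p.1, e.1))
              = fun (p : String × Int × Option Int) => p.1 == y) from rfl] at *
        rw [List.map_map]
        rw [show ((fun (x : String × String) => x.2) ∘ (fun (p : String × Int × Option Int) => (p.1, e.1)))
              = (fun (_ : String × Int × Option Int) => e.1) from rfl]
        rw [this]
        simp
  intro y
  have h0 : (PySem.Dict.empty : PySem.Dict String (List String)).getD y [] = [] := rfl
  rw [pvPerYear, main rdb PySem.Dict.empty hin y, h0, List.nil_append]

-- names of any gender-restricted filter of rdb are distinct (from unique (name, gender) keys)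
theorem pv_names_nodup (rdb : List (String × String × List (String × Int × Option Int))) (gender : String)
    (hpre : (rdb.map (fun e => (e.1, e.2.1))).Nodup)
    (q : String × String × List (String × Int × Option Int) → Bool)
    (hq : ∀ e, q e = true → e.2.1 = gender) :
    ((rdb.filter q).map (fun e => e.1)).Nodup := by
  rw [List.Nodup, List.pairwise_map] at hpre ⊢
  refine List.Pairwise.imp_of_mem ?_ (List.Pairwise.filter q hpre)
  intro a b ha hb hne
  have hga := hq a (List.of_mem_filter ha)
  have hgb := hq b (List.of_mem_filter hb)
  intro h1
  exact hne (by rw [Prod.ext_iff]; exact ⟨h1, by rw [hga, hgb]⟩)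

-- intersecting a gender-restricted name list with one year's column adds that year's pass test
theorem pv_inter_step (rdb : List (String × String × List (String × Int × Option Int))) (gender : String)
    (top : Int) (y : String)
    (hpre : (rdb.map (fun e => (e.1, e.2.1))).Nodup)
    (q : String × String × List (String × Int × Option Int) → Bool)
    (hq : ∀ e ∈ rdb, q e = true → e.2.1 = gender) :
    PySem.Set.inter ((rdb.filter q).map (fun e => e.1)) (PySem.Set.ofList (pvOkL rdb gender top y))
      = (rdb.filter (fun e => q e && pvPass e.2.2 y top)).map (fun e => e.1) := by
  rw [show pvOkL rdb gender top y
      = (rdb.filter (fun e => e.2.1 == gender && pvPass e.2.2 y top)).map (fun e => e.1) from rfl]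
  rw [PySem.Set.ofList_eq_self_of_nodup _
    (pv_names_nodup rdb gender hpre _ (fun e he => by simpa using (Bool.and_elim_left he)))]
  show List.filter _ _ = _
  rw [List.filter_map, List.filter_filter]
  refine congrArg _ (List.filter_congr ?_)
  intro e he
  rcases hqe : q e with _ | _
  · simp [hqe, Function.comp]
  · have hg := hq e he hqe
    simp only [hqe, Bool.and_true, Bool.true_and, Function.comp]
    rcases hp : pvPass e.2.2 y top with _ | _
    · -- e does not pass: its name is not in the year's column
      simp only [PySem.Set.contains, List.contains_eq_mem]
      simp only [decide_eq_false_iff_not, pvOkL, List.mem_map, List.mem_filter]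
      rintro ⟨e', ⟨he', hok⟩, hname⟩
      have hg' : e'.2.1 = gender := by
        have := Bool.and_elim_left hok
        simpa using this
      have : e' = e := List.inj_on_of_nodup_map hpre he' he
        (by rw [Prod.ext_iff]; exact ⟨hname, by rw [hg, hg']⟩)
      rw [this] at hok
      rw [hp] at hok
      simp at hok
    · -- e passes: e itself witnesses membership
      simp only [PySem.Set.contains, List.contains_eq_mem]
      simp only [decide_eq_true_eq, pvOkL, List.mem_map, List.mem_filter]
      exact ⟨e, ⟨he, by simp [hg, hp]⟩, rfl⟩

-- the Option-valued fold, once started, is a plain intersection fold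
theorem pv_fold_some (rdb : List (String × String × List (String × Int × Option Int))) (gender : String)
    (top : Int) (rest : List String) (s : PySem.Set String) :
    rest.foldl (fun (s : Option (PySem.Set String)) y =>
        match s with
        | none => some (PySem.Set.ofList ((pvPerYear rdb gender top).getD y []))
        | some t => some (PySem.Set.inter t (PySem.Set.ofList ((pvPerYear rdb gender top).getD y [])))) (some s)
      = some (rest.foldl (fun t y => PySem.Set.inter t (PySem.Set.ofList ((pvPerYear rdb gender top).getD y []))) s) := by
  induction rest generalizing s with
  | nil => rfl
  | cons y rest ih => exact ih _

-- the running intersection across years is the conjunction of the per-year tests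
theorem pv_fold_inter (rdb : List (String × String × List (String × Int × Option Int))) (gender : String)
    (top : Int)
    (hpre : (rdb.map (fun e => (e.1, e.2.1))).Nodup)
    (rest : List String) :
    ∀ (q : String × String × List (String × Int × Option Int) → Bool),
      (∀ e ∈ rdb, q e = true → e.2.1 = gender) →
      rest.foldl (fun t y => PySem.Set.inter t (PySem.Set.ofList (pvOkL rdb gender top y))) ((rdb.filter q).map (fun e => e.1))
        = (rdb.filter (fun e => q e && rest.all (fun y => pvPass e.2.2 y top))).map (fun e => e.1) := by
  induction rest with
  | nil => intro q hq; simp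
  | cons y rest ih =>
    intro q hq
    rw [List.foldl_cons, pv_inter_step rdb gender top y hpre q hq]
    rw [ih (fun e => q e && pvPass e.2.2 y top)
        (fun e he h => hq e he (Bool.and_elim_left h))]
    refine congrArg _ (List.filter_congr ?_)
    intro e _
    simp [Bool.and_assoc]

-- A's set-union loop over rdb.values() equals B's flattened comprehension
theorem pv_years_eq (rdb : List (String × String × List (String × Int × Option Int))) :
    rdb.foldl (fun s e => PySem.Set.update s (e.2.2.map (·.1))) PySem.Set.empty
      = PySem.Set.ofList (rdb.flatMap (fun e => e.2.2.map Prod.fst)) := by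
  show _ = PySem.Set.update PySem.Set.empty _
  generalize PySem.Set.empty = s
  induction rdb generalizing s with
  | nil => rfl
  | cons e rdb ih =>
    simp only [List.foldl_cons, List.flatMap_cons, ih]
    show _ = List.foldl _ s _
    rw [List.foldl_append]
    rfl

-- A's append-with-guards loop over rdb.items() is a filter-map
theorem pv_loopA_eq (rdb : List (String × String × List (String × Int × Option Int))) (gender : String)
    (c : String × String × List (String × Int × Option Int) → Bool) :
    rdb.foldl (fun acc e => if e.2.1 != gender then acc
        else if c e then acc ++ [e.1] else acc) ([] : List String)
      = (rdb.filter (fun e => e.2.1 == gender && c e)).map (fun e => e.1) := by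
  have hfun : (fun (acc : List String) (e : String × String × List (String × Int × Option Int)) =>
      if e.2.1 != gender then acc else if c e then acc ++ [e.1] else acc)
      = (fun acc e => if (e.2.1 == gender && c e) then acc ++ [e.1] else acc) := by
    funext acc e
    rcases h : e.2.1 == gender with _ | _ <;> simp [bne, h]
  rw [hfun, PySem.List.foldl_append_if]
  simp

-- ===== VERDICT (by name: the statement is the Claim_ definition above) =====
theorem always_popular_names_spec : Claim_equal_always_popular_names := by
  intro rdb gender years top _ hpre
  obtain ⟨hkeys, hin⟩ := hpre
  unfold Spec_always_popular_names always_popular_names always_popular_names_alt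
  rw [show pvYearsAll rdb = PySem.List.sorted (PySem.Set.ofList (rdb.flatMap
        (fun (e : String × String × List (String × Int × Option Int)) => e.2.2.map Prod.fst)))
        (fun x => x) false from congrArg (PySem.List.sorted · (fun x => x) false) (pv_years_eq rdb)]
  set ys := (match years with
    | none => PySem.List.sorted (PySem.Set.ofList (rdb.flatMap
        (fun (e : String × String × List (String × Int × Option Int)) => e.2.2.map Prod.fst)))
        (fun x => x) false
    | some l => l) with hys
  refine congrArg (PySem.List.sorted · (fun x => x) false) ?_
  rw [pv_loopA_eq rdb gender (fun e => pvAlwaysTop e.2.2 top ys)]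
  have hga : ∀ (e : String × String × List (String × Int × Option Int)),
      (e.2.1 == gender) = true → e.2.1 = gender := fun e h => by simpa using h
  cases ys with
  | nil =>
    rw [PySem.Set.ofList_eq_self_of_nodup _ (pv_names_nodup rdb gender hkeys _ hga)]
    refine Eq.symm (congrArg _ (List.filter_congr ?_))
    intro e _
    simp [pvAlwaysTop]
  | cons y0 rest =>
    rw [List.foldl_cons, pv_fold_some]
    show _ = rest.foldl (fun t y => PySem.Set.inter t (PySem.Set.ofList ((pvPerYear rdb gender top).getD y [])))
      (PySem.Set.ofList ((pvPerYear rdb gender top).getD y0 []))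
    simp only [pvPerYear_getD rdb gender top hin]
    rw [show PySem.Set.ofList (pvOkL rdb gender top y0) = pvOkL rdb gender top y0 from
      PySem.Set.ofList_eq_self_of_nodup _
        (pv_names_nodup rdb gender hkeys _ (fun e h => by simpa using (Bool.and_elim_left h)))]
    rw [show pvOkL rdb gender top y0
        = (rdb.filter (fun e => e.2.1 == gender && pvPass e.2.2 y0 top)).map (fun e => e.1) from rfl]
    rw [pv_fold_inter rdb gender top hkeys rest
      (fun e => e.2.1 == gender && pvPass e.2.2 y0 top)
      (fun e he h => hga e (Bool.and_elim_left h))]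
    refine congrArg _ (List.filter_congr ?_)
    intro e _
    simp [pvAlwaysTop_eq_all, List.all_cons, Bool.and_assoc]
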